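-- pv_equiv track=rewrite | github.com/chboishabba/SensibLaw | src/obligation_views.py | _dedup_scopes
-- ===== SOURCE A (Python) =====
-- from typing import Dict, Iterable, List, Optional, Sequence, Tuple
--
-- def _dedup_scopes(scope_dicts: List[dict]) -> List[dict]:
--     # keep the shortest phrase per category to avoid window-inflated duplicates
--     best: dict[str, dict] = {}
--     for scope in scope_dicts:
--         existing = best.get(scope["category"])
--         if (
--             existing is None
--             or len(scope["normalized"]) < len(existing["normalized"])
--             or (
--                 len(scope["normalized"]) == len(existing["normalized"])
--                 and scope["normalized"] < existing["normalized"]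
--             )
--         ):
--             best[scope["category"]] = scope
--     return [scope for _, scope in sorted(best.items(), key=lambda kv: kv[0])]
-- ===== SOURCE B (Python) =====
-- def _dedup_scopes(scope_dicts):
--     # group-by-category: sorted distinct categories, then the first minimal phrase per category
--     categories = sorted({scope["category"] for scope in scope_dicts})
--     return [
--         min(
--             (scope for scope in scope_dicts if scope["category"] == category),
--             key=lambda scope: (len(scope["normalized"]), scope["normalized"]),
--         )
--         for category in categories
--     ]
-- ===== Notes on version B (the rewrite author's own statement) =====
-- stated objective: alternative
-- what changed: Replaces A's single-pass best-per-category dict accumulation with a group-by decomposition: sort the distinct categories, then take Python min (key = (len, phrase)) over each category's scopes.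
-- outside the precondition, e.g. on _dedup_scopes([{'category': 'a'}]): A returns [{'category': 'a'}], B raises KeyError
import Mathlib
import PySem

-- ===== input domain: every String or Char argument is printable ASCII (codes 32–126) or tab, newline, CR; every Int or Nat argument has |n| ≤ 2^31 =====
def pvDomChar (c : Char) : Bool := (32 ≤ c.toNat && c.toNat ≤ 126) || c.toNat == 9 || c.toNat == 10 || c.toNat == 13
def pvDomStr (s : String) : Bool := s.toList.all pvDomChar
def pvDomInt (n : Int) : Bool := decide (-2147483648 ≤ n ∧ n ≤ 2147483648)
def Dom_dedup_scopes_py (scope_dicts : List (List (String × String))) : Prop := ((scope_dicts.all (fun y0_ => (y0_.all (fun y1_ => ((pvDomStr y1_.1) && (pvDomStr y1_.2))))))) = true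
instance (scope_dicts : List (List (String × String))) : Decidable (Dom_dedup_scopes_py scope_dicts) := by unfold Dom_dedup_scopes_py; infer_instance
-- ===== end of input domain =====

-- B replaces A's incremental best-per-category dict with sorted-distinct-categories + per-category minimum (alternative decomposition, same results).


-- ===== PORT A =====
-- shared accessors: scope["category"] / scope["normalized"] (total via a default; Pre_ guarantees the keys are present)
def pvCat (s : List (String × String)) : String := (PySem.Dict.mk s).getD "category" ""
def pvNorm (s : List (String × String)) : String := (PySem.Dict.mk s).getD "normalized" ""

def dedup_scopes_py (scope_dicts : List (List (String × String))) : List (List (String × String)) :=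
  let best : PySem.Dict String (List (String × String)) :=
    scope_dicts.foldl (fun best scope =>
      match best.get? (pvCat scope) with
      | none => best.insert (pvCat scope) scope
      | some existing =>
          if PySem.Str.len (pvNorm scope) < PySem.Str.len (pvNorm existing)
              ∨ (PySem.Str.len (pvNorm scope) = PySem.Str.len (pvNorm existing)
                 ∧ pvNorm scope < pvNorm existing)
          then best.insert (pvCat scope) scope
          else best) PySem.Dict.empty
  (PySem.List.sorted best.items (fun kv => kv.1) false).map (fun kv => kv.2)

-- ===== PORT B =====
def dedup_scopes_py_alt (scope_dicts : List (List (String × String))) : List (List (String × String)) :=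
  let categories := PySem.List.sorted (PySem.Set.ofList (scope_dicts.map (fun s => pvCat s))) (fun c => c) false
  categories.map (fun category =>
    match PySem.List.min2? (scope_dicts.filter (fun s => pvCat s == category))
        (fun s => PySem.Str.len (pvNorm s)) (fun s => pvNorm s) with
    | some s => s
    | none => [])   -- unreachable: each category comes from some scope

-- ===== PRECONDITION & SPEC =====
-- Pre_ excludes scope dicts missing the "category" or "normalized" key (A raises KeyError except when a key-less
-- scope's category is never contested, where B's min key still reads "normalized" and raises) and association
-- lists with duplicate keys, which do not represent a Python dict faithfully.
def Pre_dedup_scopes_py (scope_dicts : List (List (String × String))) : Prop :=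
  ∀ s ∈ scope_dicts, (s.map Prod.fst).Nodup ∧ "category" ∈ s.map Prod.fst ∧ "normalized" ∈ s.map Prod.fst
instance (scope_dicts : List (List (String × String))) : Decidable (Pre_dedup_scopes_py scope_dicts) := by
  unfold Pre_dedup_scopes_py; infer_instance

def pvWitness_dedup_scopes_py : (List (List (String × String))) :=
  [[("category", "a"), ("normalized", "x")]]

def Spec_dedup_scopes_py (scope_dicts : List (List (String × String))) (out : List (List (String × String))) : Prop := out = dedup_scopes_py_alt scope_dicts
instance (scope_dicts : List (List (String × String))) (out : List (List (String × String))) : Decidable (Spec_dedup_scopes_py scope_dicts out) := by unfold Spec_dedup_scopes_py; infer_instance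

-- ===== CLAIM (what is proved, stated in full; the proofs are below) =====
def Claim_equal_dedup_scopes_py : Prop := ∀ (scope_dicts : List (List (String × String))), Dom_dedup_scopes_py scope_dicts → Pre_dedup_scopes_py scope_dicts → Spec_dedup_scopes_py scope_dicts (dedup_scopes_py scope_dicts)

-- ===== LEMMAS AND PROOFS =====

def pvAStep (best : PySem.Dict String (List (String × String))) (scope : List (String × String)) :
    PySem.Dict String (List (String × String)) :=
  match best.get? (pvCat scope) with
  | none => best.insert (pvCat scope) scope
  | some existing =>
      if PySem.Str.len (pvNorm scope) < PySem.Str.len (pvNorm existing)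
          ∨ (PySem.Str.len (pvNorm scope) = PySem.Str.len (pvNorm existing)
             ∧ pvNorm scope < pvNorm existing)
      then best.insert (pvCat scope) scope
      else best
def pvMStep (acc : Option (List (String × String))) (x : List (String × String)) :
    Option (List (String × String)) :=
  match acc with
  | none => some x
  | some m =>
      if (decide (PySem.Str.len (pvNorm x) < PySem.Str.len (pvNorm m))
          || (!decide (PySem.Str.len (pvNorm m) < PySem.Str.len (pvNorm x))
              && decide (pvNorm x < pvNorm m))) = true
      then some x else some m
theorem pv_cond (x m : List (String × String)) :
    ((decide (PySem.Str.len (pvNorm x) < PySem.Str.len (pvNorm m))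
      || (!decide (PySem.Str.len (pvNorm m) < PySem.Str.len (pvNorm x))
          && decide (pvNorm x < pvNorm m))) = true)
    ↔ (PySem.Str.len (pvNorm x) < PySem.Str.len (pvNorm m)
       ∨ (PySem.Str.len (pvNorm x) = PySem.Str.len (pvNorm m) ∧ pvNorm x < pvNorm m)) := by
  simp only [Bool.or_eq_true, Bool.and_eq_true, Bool.not_eq_true', decide_eq_true_eq,
    decide_eq_false_iff_not]
  constructor
  · rintro (h | ⟨h1, h2⟩)
    · exact Or.inl h
    · by_cases hlt : PySem.Str.len (pvNorm x) < PySem.Str.len (pvNorm m)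
      · exact Or.inl hlt
      · exact Or.inr ⟨by omega, h2⟩
  · rintro (h | ⟨h1, h2⟩)
    · exact Or.inl h
    · exact Or.inr ⟨by omega, h2⟩

theorem pvAStep_get? (d : PySem.Dict String (List (String × String)))
    (s : List (String × String)) (c : String) :
    (pvAStep d s).get? c = if pvCat s = c then pvMStep (d.get? c) s else d.get? c := by
  by_cases hc : pvCat s = c
  · subst hc
    rw [if_pos rfl]
    unfold pvAStep pvMStep
    cases hget : d.get? (pvCat s) with
    | none => simp
    | some e =>
      dsimp only
      by_cases hcond : PySem.Str.len (pvNorm s) < PySem.Str.len (pvNorm e)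
          ∨ (PySem.Str.len (pvNorm s) = PySem.Str.len (pvNorm e) ∧ pvNorm s < pvNorm e)
      · rw [if_pos hcond, if_pos ((pv_cond s e).mpr hcond), PySem.Dict.get?_insert, if_pos rfl]
      · rw [if_neg hcond, if_neg (fun hb => hcond ((pv_cond s e).mp hb)), hget]
  · rw [if_neg hc]
    unfold pvAStep
    cases hget : d.get? (pvCat s) with
    | none => rw [PySem.Dict.get?_insert, if_neg (fun h => hc h.symm)]
    | some e =>
      dsimp only
      by_cases hcond : PySem.Str.len (pvNorm s) < PySem.Str.len (pvNorm e)
          ∨ (PySem.Str.len (pvNorm s) = PySem.Str.len (pvNorm e) ∧ pvNorm s < pvNorm e)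
      · rw [if_pos hcond, PySem.Dict.get?_insert, if_neg (fun h => hc h.symm)]
      · rw [if_neg hcond]

theorem pvAStep_keys (d : PySem.Dict String (List (String × String)))
    (s : List (String × String)) :
    (pvAStep d s).keys = PySem.Set.add d.keys (pvCat s) := by
  unfold pvAStep
  cases hget : d.get? (pvCat s) with
  | none =>
    have hcon : d.contains (pvCat s) = false := by
      rw [PySem.Dict.contains_eq_isSome_get?, hget]; rfl
    have hmem : pvCat s ∉ d.keys := by
      intro hm
      rw [← PySem.Dict.contains_iff_mem_keys] at hm
      simp [hcon] at hm
    rw [PySem.Dict.keys_insert_of_not_contains d s hcon]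
    simp [PySem.Set.add, PySem.Set.contains, hmem]
  | some e =>
    dsimp only
    have hcon : d.contains (pvCat s) = true := by
      rw [PySem.Dict.contains_eq_isSome_get?, hget]; rfl
    have hmem : pvCat s ∈ d.keys := (PySem.Dict.contains_iff_mem_keys d _).mp hcon
    have hadd : PySem.Set.add d.keys (pvCat s) = d.keys := by
      simp [PySem.Set.add, PySem.Set.contains, hmem]
    by_cases hcond : PySem.Str.len (pvNorm s) < PySem.Str.len (pvNorm e)
        ∨ (PySem.Str.len (pvNorm s) = PySem.Str.len (pvNorm e) ∧ pvNorm s < pvNorm e)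
    · rw [if_pos hcond, PySem.Dict.keys_insert_of_contains d s hcon, hadd]
    · rw [if_neg hcond, hadd]

theorem pv_min2?_eq_foldl (xs : List (List (String × String))) :
    PySem.List.min2? xs (fun s => PySem.Str.len (pvNorm s)) (fun s => pvNorm s)
      = xs.foldl pvMStep none := by
  unfold PySem.List.min2?
  congr 1
  funext acc x
  cases acc <;> rfl

-- the best-dict invariant: each category's entry is the fold of the replace-if-better step over its group
theorem pv_inv (l : List (List (String × String)))
    (d : PySem.Dict String (List (String × String))) (c : String) :
    (l.foldl pvAStep d).get? c
      = (l.filter (fun s => pvCat s == c)).foldl pvMStep (d.get? c) := by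
  induction l generalizing d with
  | nil => rfl
  | cons s t ih =>
    simp only [List.foldl_cons, List.filter_cons]
    rw [ih, pvAStep_get?]
    by_cases hc : pvCat s = c
    · simp only [hc, beq_self_eq_true, if_true, List.foldl_cons]
    · have hbeq : (pvCat s == c) = false := by simp [hc]
      simp only [hc, hbeq, Bool.false_eq_true, if_false]

-- the best-dict's keys are the distinct categories in first-appearance order
theorem pv_keys (l : List (List (String × String)))
    (d : PySem.Dict String (List (String × String))) :
    (l.foldl pvAStep d).keys = PySem.Set.update d.keys (l.map pvCat) := by
  induction l generalizing d with
  | nil => rfl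
  | cons s t ih =>
    simp only [List.foldl_cons, List.map_cons]
    rw [ih, pvAStep_keys]
    rfl

-- a dict with distinct keys is determined by getD over its keys
theorem pv_items_eq (d : PySem.Dict String (List (String × String))) (h : d.keys.Nodup) :
    d.items = d.keys.map (fun c => (c, d.getD c [])) := by
  show d.items = (d.items.map (fun p => p.1)).map (fun c => (c, d.getD c []))
  rw [List.map_map]
  conv_lhs => rw [← List.map_id d.items]
  refine List.map_congr_left ?_
  intro p hp
  have hget : d.get? p.1 = some p.2 := PySem.Dict.get?_of_mem_items d (by exact hp) h
  simp [Function.comp, PySem.Dict.getD_eq_get?_getD, hget]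

theorem pv_map_insertBy {α β : Type} (h : β → α) (bef : α → α → Bool) (x : β) (acc : List β) :
    (PySem.List.insertBy (fun a b => bef (h a) (h b)) x acc).map h
      = PySem.List.insertBy bef (h x) (acc.map h) := by
  induction acc with
  | nil => rfl
  | cons y t ih =>
    simp only [PySem.List.insertBy, List.map_cons]
    by_cases hb : bef (h x) (h y)
    · simp [hb]
    · simp [hb, ih]

theorem pv_sorted_map_aux {α β κ : Type} [LT κ] [DecidableLT κ] (h : β → α) (key : α → κ)
    (ys : List β) (acc : List β) :
    ys.foldl (fun a y => PySem.List.insertBy (fun a b => decide (key a < key b)) (h y) a) (acc.map h)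
      = (ys.foldl (fun a y =>
          PySem.List.insertBy (fun a b => decide (key (h a) < key (h b))) y a) acc).map h := by
  induction ys generalizing acc with
  | nil => rfl
  | cons y t ih =>
    simp only [List.foldl_cons]
    rw [← pv_map_insertBy h (fun a b => decide (key a < key b)) y acc, ih]

-- sorting a mapped list by a key that reads through the map
theorem pv_sorted_map {α β κ : Type} [LT κ] [DecidableLT κ] (h : β → α) (key : α → κ)
    (ys : List β) :
    PySem.List.sorted (ys.map h) key false
      = (PySem.List.sorted ys (fun y => key (h y)) false).map h := by
  show (ys.map h).foldl (fun acc x =>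
      PySem.List.insertBy (fun a b => decide (key a < key b)) x acc) []
    = (ys.foldl (fun acc x =>
      PySem.List.insertBy (fun a b => decide (key (h a) < key (h b))) x acc) []).map h
  rw [List.foldl_map]
  exact pv_sorted_map_aux h key ys []

theorem pv_foldl_some (xs : List (List (String × String))) (a : List (String × String)) :
    xs.foldl pvMStep (some a) ≠ none := by
  induction xs generalizing a with
  | nil => simp
  | cons x t ih =>
    simp only [List.foldl_cons]
    have hx : ∃ b, pvMStep (some a) x = some b := by
      unfold pvMStep
      dsimp only
      split
      · exact ⟨x, rfl⟩
      · exact ⟨a, rfl⟩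
    obtain ⟨b, hb⟩ := hx
    rw [hb]
    exact ih b

theorem pv_equiv (scope_dicts : List (List (String × String))) :
    dedup_scopes_py scope_dicts = dedup_scopes_py_alt scope_dicts := by
  show (PySem.List.sorted (scope_dicts.foldl pvAStep PySem.Dict.empty).items
          (fun kv => kv.1) false).map (fun kv => kv.2)
    = (PySem.List.sorted (PySem.Set.ofList (scope_dicts.map (fun s => pvCat s)))
          (fun c => c) false).map (fun category =>
        match PySem.List.min2? (scope_dicts.filter (fun s => pvCat s == category))
            (fun s => PySem.Str.len (pvNorm s)) (fun s => pvNorm s) with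
        | some s => s
        | none => [])
  have hkeys : (scope_dicts.foldl pvAStep PySem.Dict.empty).keys
      = PySem.Set.ofList (scope_dicts.map pvCat) := pv_keys scope_dicts PySem.Dict.empty
  have hnd : (scope_dicts.foldl pvAStep PySem.Dict.empty).keys.Nodup := by
    rw [hkeys]; exact PySem.Set.nodup_ofList _
  rw [pv_items_eq _ hnd,
    pv_sorted_map (fun c => (c, (scope_dicts.foldl pvAStep PySem.Dict.empty).getD c []))
      (fun kv => kv.1), List.map_map, hkeys]
  refine List.map_congr_left ?_
  intro c hcmem
  have hc : c ∈ scope_dicts.map pvCat := by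
    rw [PySem.List.mem_sorted] at hcmem
    exact (PySem.Set.mem_ofList _ _).mp hcmem
  obtain ⟨s, hs, hsc⟩ := List.mem_map.mp hc
  have hfil : s ∈ scope_dicts.filter (fun s => pvCat s == c) :=
    List.mem_filter.mpr ⟨hs, by simp [hsc]⟩
  have hne : scope_dicts.filter (fun s => pvCat s == c) ≠ [] := List.ne_nil_of_mem hfil
  have hget : (scope_dicts.foldl pvAStep PySem.Dict.empty).get? c
      = (scope_dicts.filter (fun s => pvCat s == c)).foldl pvMStep none :=
    pv_inv scope_dicts PySem.Dict.empty c
  have hsome : PySem.List.min2? (scope_dicts.filter (fun s => pvCat s == c))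
      (fun s => PySem.Str.len (pvNorm s)) (fun s => pvNorm s) ≠ none := by
    rw [pv_min2?_eq_foldl]
    obtain ⟨x, xs, hxs⟩ := List.exists_cons_of_ne_nil hne
    rw [hxs, List.foldl_cons]
    exact pv_foldl_some xs x
  obtain ⟨v, hv⟩ := Option.ne_none_iff_exists'.mp hsome
  simp only [Function.comp, hv]
  rw [PySem.Dict.getD_eq_get?_getD, hget, ← pv_min2?_eq_foldl, hv]
  rfl

-- ===== VERDICT (by name: the statement is the Claim_ definition above) =====
theorem dedup_scopes_py_spec : Claim_equal_dedup_scopes_py := by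
  intro l _ _
  unfold Spec_dedup_scopes_py
  exact pv_equiv l
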